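-- pv_equiv track=rewrite | github.com/codersasank/problem-solving | geeks_for_geeks/alternative_sorting.py | alternateSort
-- ===== SOURCE A (Python) =====
-- def alternateSort(arr):
--     n = len(arr)
--     arr.sort()
--     pos = [0 for i in range(n)]
--     ret = [0 for i in range(n)]
--     for i in range(0,n,2):
--         pos[i] = n-1-(i//2)
--     for i in range(1,n,2):
--         pos[i] = (i-1)//2
--     for i in range(n):
--         ret[i] = arr[pos[i]]
--     return ret
-- ===== SOURCE B (Python) =====
-- def alternateSort(arr):
--     arr.sort()  # same in-place sort as A
--     res = []
--     lo, hi = 0, len(arr) - 1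
--     take_high = True
--     while lo <= hi:
--         if take_high:
--             res.append(arr[hi])
--             hi -= 1
--         else:
--             res.append(arr[lo])
--             lo += 1
--         take_high = not take_high
--     return res
-- ===== Notes on version B (the rewrite author's own statement) =====
-- stated objective: simpler
-- what changed: Replaced A's pos[] permutation array and its three separate index loops by a single two-converging-pointers sweep (lo/hi with a take-high toggle) over the sorted list; B performs the same in-place arr.sort() as A.
import Mathlib
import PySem

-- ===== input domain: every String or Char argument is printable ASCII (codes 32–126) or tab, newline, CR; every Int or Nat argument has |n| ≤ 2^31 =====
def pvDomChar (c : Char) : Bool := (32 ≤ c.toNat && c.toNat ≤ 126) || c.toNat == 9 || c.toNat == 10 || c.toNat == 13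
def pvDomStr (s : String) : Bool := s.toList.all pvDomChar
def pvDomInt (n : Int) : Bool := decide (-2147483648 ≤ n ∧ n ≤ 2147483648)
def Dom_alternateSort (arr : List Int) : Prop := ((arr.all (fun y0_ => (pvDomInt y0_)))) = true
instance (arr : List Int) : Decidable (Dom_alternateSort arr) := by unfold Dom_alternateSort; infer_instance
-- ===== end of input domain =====

-- B replaces A's pos[] permutation array and three index loops by a single two-pointer sweep
-- over the sorted list (objective: simpler). Both A and B sort arr in place (same mutation);
-- the equivalence proved is about the return value.


-- ===== PORT A =====
-- literal transliteration of A: sort, build pos[] by two stepped index loops, gather ret[].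
-- pyGetD's default 0 is never used: every index written/read lies in range.
def alternateSort (arr : List Int) : List Int :=
  let n : Int := arr.length
  let arr := PySem.List.sorted arr (fun x => x)
  let pos : List Int := (PySem.List.pyRange 0 n 1).map (fun _ => 0)
  let ret : List Int := (PySem.List.pyRange 0 n 1).map (fun _ => 0)
  let pos := (PySem.List.pyRange 0 n 2).foldl
      (fun p i => PySem.List.pySetD p i (n - 1 - PySem.Int.floordiv i 2)) pos
  let pos := (PySem.List.pyRange 1 n 2).foldl
      (fun p i => PySem.List.pySetD p i (PySem.Int.floordiv (i - 1) 2)) pos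
  let ret := (PySem.List.pyRange 0 n 1).foldl
      (fun r i => PySem.List.pySetD r i
        (PySem.List.pyGetD arr (PySem.List.pyGetD pos i 0) 0)) ret
  ret

-- ===== PORT B =====
-- B's while loop: two converging pointers lo/hi on the sorted list, toggle starts at 'take high'.
def altGo (s : List Int) (lo hi : Int) (takeHigh : Bool) : List Int :=
  if h : lo ≤ hi then
    if takeHigh then
      PySem.List.pyGetD s hi 0 :: altGo s lo (hi - 1) false
    else
      PySem.List.pyGetD s lo 0 :: altGo s (lo + 1) hi true
  else []
termination_by (hi + 1 - lo).toNat
decreasing_by all_goals omega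

def alternateSort_alt (arr : List Int) : List Int :=
  let s := PySem.List.sorted arr (fun x => x)
  altGo s 0 ((s.length : Int) - 1) true

-- ===== PRECONDITION & SPEC =====
def Spec_alternateSort (arr : List Int) (out : List Int) : Prop := out = alternateSort_alt arr
instance (arr : List Int) (out : List Int) : Decidable (Spec_alternateSort arr out) := by unfold Spec_alternateSort; infer_instance

-- ===== CLAIM (what is proved, stated in full; the proofs are below) =====
def Claim_equal_alternateSort : Prop := ∀ (arr : List Int), Dom_alternateSort arr → Spec_alternateSort arr (alternateSort arr)

-- ===== LEMMAS AND PROOFS =====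

-- length is preserved by a fold that only writes cells
lemma length_foldl_pySetD (f : Int → Int) (L : List Int) (r0 : List Int) :
    (L.foldl (fun r i => PySem.List.pySetD r i (f i)) r0).length = r0.length := by
  induction L generalizing r0 with
  | nil => rfl
  | cons x L ih => simpa [PySem.List.length_pySetD] using ih (PySem.List.pySetD r0 x (f x))

-- reading cell j after writing f i at every index i ∈ L (indices nonneg)
lemma getD_foldl_pySetD (f : Int → Int) (L : List Int) (hpos : ∀ i ∈ L, 0 ≤ i)
    (r0 : List Int) (j : Nat) (hj : j < r0.length) (d : Int) :
    (L.foldl (fun r i => PySem.List.pySetD r i (f i)) r0).getD j d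
      = if (j : Int) ∈ L then f j else r0.getD j d := by
  induction L generalizing r0 with
  | nil => simp
  | cons x L ih =>
    have hx : 0 ≤ x := hpos x (by simp)
    rw [List.foldl_cons,
        ih (fun i hi => hpos i (by simp [hi])) _ (by simpa [PySem.List.length_pySetD] using hj),
        PySem.List.pySetD_of_nonneg _ _ hx]
    by_cases hjL : (j : Int) ∈ L
    · simp [hjL]
    · by_cases hjx : (j : Int) = x
      · have hxt : x.toNat = j := by omega
        simp [hjL, hjx.symm, List.getD, hj]
      · have hxt : x.toNat ≠ j := by omega
        simp [hjL, hjx, List.getD, hxt]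

-- the permutation index A stores in pos[j]
def posval (n : Int) (j : Nat) : Int :=
  if j % 2 = 0 then n - 1 - (j : Int) / 2 else ((j : Int) - 1) / 2

-- A's output, written as one map over the positions
lemma alternateSort_eq_map (arr : List Int) :
    alternateSort arr =
      (List.range arr.length).map
        (fun j => PySem.List.pyGetD (PySem.List.sorted arr (fun x => x))
          (posval (arr.length : Int) j) 0) := by
  simp only [alternateSort]
  set s := PySem.List.sorted arr (fun x => x) with hs
  set n : Int := (arr.length : Int) with hn
  set base : List Int := (PySem.List.pyRange 0 n 1).map (fun _ => (0 : Int)) with hbase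
  set pos1 := (PySem.List.pyRange 0 n 2).foldl
      (fun p i => PySem.List.pySetD p i (n - 1 - PySem.Int.floordiv i 2)) base with hpos1
  set pos2 := (PySem.List.pyRange 1 n 2).foldl
      (fun p i => PySem.List.pySetD p i (PySem.Int.floordiv (i - 1) 2)) pos1 with hpos2
  have hbl : base.length = arr.length := by
    simp [hbase, PySem.List.length_pyRange_one, hn]
  have hp1l : pos1.length = arr.length := by
    rw [hpos1, length_foldl_pySetD (fun i => n - 1 - PySem.Int.floordiv i 2), hbl]
  have hp2l : pos2.length = arr.length := by
    rw [hpos2, length_foldl_pySetD (fun i => PySem.Int.floordiv (i - 1) 2), hp1l]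
  apply List.ext_getElem
  · rw [length_foldl_pySetD (fun i => PySem.List.pyGetD s (PySem.List.pyGetD pos2 i 0) 0), hbl]
    simp
  intro j hj1 hj2
  have hjn : j < arr.length := by simpa using hj2
  have hL := getD_foldl_pySetD (fun i => PySem.List.pyGetD s (PySem.List.pyGetD pos2 i 0) 0)
      (PySem.List.pyRange 0 n 1)
      (fun i hi => ((PySem.List.mem_pyRange_one).1 hi).1) base j (by omega) 0
  have hmem1 : (j : Int) ∈ PySem.List.pyRange 0 n 1 := by
    rw [PySem.List.mem_pyRange_one]; omega
  have hp2 := getD_foldl_pySetD (fun i => PySem.Int.floordiv (i - 1) 2)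
      (PySem.List.pyRange 1 n 2)
      (fun i hi => by
        have := ((PySem.List.mem_pyRange_iff_of_pos (by norm_num) i).1 hi).1; omega)
      pos1 j (by omega) 0
  have hp1 := getD_foldl_pySetD (fun i => n - 1 - PySem.Int.floordiv i 2)
      (PySem.List.pyRange 0 n 2)
      (fun i hi => by
        have := ((PySem.List.mem_pyRange_iff_of_pos (by norm_num) i).1 hi).1; omega)
      base j (by omega) 0
  have hbj : base.getD j 0 = 0 := by
    rw [hbase]
    rcases Nat.lt_or_ge j base.length with h | h
    · rw [List.getD_eq_getElem _ _ (by rwa [← hbase])]; simp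
    · rw [List.getD_eq_default _ _ (by rwa [← hbase])]
  have hget : ∀ (l : List Int) (h : j < l.length), l[j] = l.getD j 0 :=
    fun l h => (List.getD_eq_getElem l 0 h).symm
  rw [hget _ hj1, hL, if_pos hmem1, List.getElem_map, List.getElem_range]
  have hpy2 : PySem.List.pyGetD pos2 (j : Int) 0 = pos2.getD j 0 := by
    simp [PySem.List.pyGetD_natCast]
  rw [hpy2, hp2]
  by_cases hpar : j % 2 = 0
  · rw [if_neg (by
      rw [PySem.List.mem_pyRange_iff_of_pos (by norm_num)]
      rintro ⟨-, -, hdvd⟩; omega), hp1,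
      if_pos (by
        rw [PySem.List.mem_pyRange_iff_of_pos (by norm_num)]
        refine ⟨by omega, by omega, by omega⟩)]
    unfold posval
    rw [if_pos hpar, PySem.Int.floordiv_eq_ediv_of_pos (by norm_num)]
  · rw [if_pos (by
      rw [PySem.List.mem_pyRange_iff_of_pos (by norm_num)]
      refine ⟨by omega, by omega, by omega⟩)]
    unfold posval
    rw [if_neg hpar, PySem.Int.floordiv_eq_ediv_of_pos (by norm_num)]

-- B's two-pointer sweep, written as one map
lemma altGo_eq_map (s : List Int) (k : Nat) : ∀ (lo hi : Int), 0 ≤ lo → (hi + 1 - lo).toNat = k →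
    altGo s lo hi true =
      (List.range k).map (fun (j : Nat) =>
        if j % 2 = 0 then PySem.List.pyGetD s (hi - (j : Int) / 2) 0
        else PySem.List.pyGetD s (lo + (j : Int) / 2) 0) := by
  induction k using Nat.strong_induction_on with
  | _ k ih =>
    intro lo hi hlo hk
    match k, hk with
    | 0, hk =>
      rw [altGo.eq_def]
      rw [dif_neg (by omega)]
      simp
    | 1, hk =>
      have heq : lo = hi := by omega
      rw [altGo.eq_def, dif_pos (by omega), if_pos rfl,
          altGo.eq_def, dif_neg (by omega)]
      simp
    | (m + 2), hk =>
      have hlt : lo < hi := by omega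
      rw [altGo.eq_def, dif_pos (by omega), if_pos rfl,
          altGo.eq_def, dif_pos (by omega), if_neg (by simp)]
      rw [ih m (by omega) (lo + 1) (hi - 1) (by omega) (by omega)]
      rw [List.range_succ_eq_map, List.range_succ_eq_map]
      simp only [List.map_cons, List.map_map]
      refine List.cons_eq_cons.2 ⟨by norm_num, List.cons_eq_cons.2 ⟨by norm_num, ?_⟩⟩
      apply List.map_congr_left
      intro j hj
      simp only [Function.comp]
      by_cases hpar : j % 2 = 0
      · rw [if_pos hpar, if_pos (by omega)]
        congr 1
        push_cast
        omega
      · rw [if_neg hpar, if_neg (by omega)]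
        congr 1
        push_cast
        omega

-- ===== VERDICT (by name: the statement is the Claim_ definition above) =====
theorem alternateSort_spec : Claim_equal_alternateSort := by
  intro arr _
  unfold Spec_alternateSort
  rw [alternateSort_eq_map]
  simp only [alternateSort_alt, PySem.List.length_sorted]
  rw [altGo_eq_map _ arr.length 0 ((arr.length : Int) - 1) le_rfl (by omega)]
  apply List.map_congr_left
  intro j hj
  unfold posval
  by_cases hpar : j % 2 = 0
  · simp only [hpar, if_true]
  · simp only [hpar, if_false]
    congr 1
    omega
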